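-- pv_equiv track=rewrite | github.com/monishnenepravaig/mycodes | Python/Google Challenge/Miso_Ramen.py | ramen_combo
-- ===== SOURCE A (Python) =====
-- def count_of_1(number):
--     count = 0
--     while number != 0:
--         value = number & 1
--         if value == 1:
--             count+=1
--         number = number>>1
--     return count
--
-- def selection_matrix(n,r):
--     high=pow(2,n)
--     matrix=[]
--     for i in range(high-1,-1,-1):
--         if count_of_1(i) == r:
--             matrix.append(i)
--     return  matrix
--
-- def group_generator(data,r):
--     n = len(data)
--     matrix = selection_matrix(n,r)
--     groups = []
--     for number in matrix:
--         set = []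
--         count = 0
--         while number != 0:
--             value = number & 1
--             if value == 1:
--                 set.append(data[count])
--             number = number>>1
--             count+=1
--         groups.append(set)
--     return groups
--
-- def ramen_combo(budget,ramen,extra):
--     min_diff= 100000
--     final=0
--     groups=group_generator(extra,2)
--     for noodle in ramen:
--         cost = noodle
--         diff = abs(cost-budget)
--         if((diff==min_diff)and(cost<final))or(diff<min_diff):
--             min_diff=diff
--             final=cost
--         for item in extra:
--             cost = noodle + item
--             diff = abs(cost-budget)
--             if((diff==min_diff)and(cost<final))or(diff<min_diff):
--                 min_diff=diff
--                 final=cost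
--         for item in groups:
--             cost = noodle + item[0]+item[1]
--             diff = abs(cost-budget)
--             if((diff==min_diff)and(cost<final))or(diff<min_diff):
--                 min_diff=diff
--                 final=cost
--     return final
-- ===== SOURCE B (Python) =====
-- def ramen_combo(budget, ramen, extra):
--     def pair_sums(xs):
--         if not xs:
--             return []
--         return [xs[0] + y for y in xs[1:]] + pair_sums(xs[1:])
--
--     addons = [0] + extra + pair_sums(extra)
--     best = (100000, 0)
--     for noodle in ramen:
--         for a in addons:
--             cost = noodle + a
--             cand = (abs(cost - budget), cost)
--             if cand < best:
--                 best = cand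
--     return best[1]
-- ===== Notes on version B (the rewrite author's own statement) =====
-- stated objective: faster
-- what changed: B generates the two-extra sums directly by a recursive head/tail pair enumeration (O(n^2)) instead of scanning all 2^n bitmasks and filtering by popcount, and selects the result as a running lexicographic min over (|cost-budget|, cost) tuples.
import Mathlib
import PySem

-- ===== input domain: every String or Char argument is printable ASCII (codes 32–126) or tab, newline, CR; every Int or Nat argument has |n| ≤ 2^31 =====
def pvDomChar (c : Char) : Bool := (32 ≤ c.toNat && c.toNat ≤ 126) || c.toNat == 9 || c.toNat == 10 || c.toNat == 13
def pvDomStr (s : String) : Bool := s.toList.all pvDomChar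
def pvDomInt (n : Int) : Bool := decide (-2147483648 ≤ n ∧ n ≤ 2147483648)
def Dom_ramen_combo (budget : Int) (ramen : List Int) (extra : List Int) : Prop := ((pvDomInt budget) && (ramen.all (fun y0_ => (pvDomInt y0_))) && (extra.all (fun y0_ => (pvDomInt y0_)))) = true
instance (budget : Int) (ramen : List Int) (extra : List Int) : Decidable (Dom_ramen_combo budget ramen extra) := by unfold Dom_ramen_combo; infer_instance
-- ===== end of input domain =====

-- B replaces A's enumeration of all 2^n bitmasks (filtered by popcount 2) with a direct
-- O(n^2) recursive pair enumeration and a running lexicographic minimum; same return value.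

-- ===== PORT A =====
-- while loop of count_of_1; 'number & 1' is PySem.Int.band, 'number >> 1' is '>>> 1'.
-- The 'number ≤ 0' guard makes the recursion total; A only calls it on numbers ≥ 0, where
-- it matches Python's 'while number != 0' exactly.
def c1go (number : Int) (count : Int) : Int :=
  if h : number ≤ 0 then count
  else
    let value := PySem.Int.band number 1
    c1go (number >>> (1 : Nat)) (if value = 1 then count + 1 else count)
termination_by number.toNat
decreasing_by
  have : number >>> (1 : Nat) = number / 2 := Int.shiftRight_eq_div_pow number 1 ▸ by norm_num
  rw [this]; omega

def count_of_1 (number : Int) : Int := c1go number 0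

-- pow(2, n): A only calls this with n = len(data) ≥ 0, where 2 ^ n.toNat is exact.
def selection_matrix (n : Int) (r : Int) : List Int :=
  let high : Int := 2 ^ n.toNat
  (PySem.List.pyRange (high - 1) (-1) (-1)).foldl
    (fun matrix i => if count_of_1 i = r then matrix ++ [i] else matrix) []

-- inner while loop of group_generator; data[count] is always in range here (masks < 2^len),
-- so the total pyGetD is exact; the 'number ≤ 0' guard only totalizes 'while number != 0'.
def ggLoop (data : List Int) (number : Int) (count : Int) (set : List Int) : List Int :=
  if h : number ≤ 0 then set
  else
    let value := PySem.Int.band number 1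
    let set' := if value = 1 then set ++ [PySem.List.pyGetD data count 0] else set
    ggLoop data (number >>> (1 : Nat)) (count + 1) set'
termination_by number.toNat
decreasing_by
  have : number >>> (1 : Nat) = number / 2 := Int.shiftRight_eq_div_pow number 1 ▸ by norm_num
  rw [this]; omega

def group_generator (data : List Int) (r : Int) : List (List Int) :=
  let n : Int := data.length
  let matrix := selection_matrix n r
  matrix.foldl (fun groups number => groups ++ [ggLoop data number 0 []]) []

def ramen_combo (budget : Int) (ramen : List Int) (extra : List Int) : Int :=
  let groups := group_generator extra 2
  let s := ramen.foldl (fun (s : Int × Int) noodle =>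
    let cost := noodle
    let diff := |cost - budget|
    let s := if (diff = s.1 ∧ cost < s.2) ∨ diff < s.1 then (diff, cost) else s
    let s := extra.foldl (fun (s : Int × Int) item =>
      let cost := noodle + item
      let diff := |cost - budget|
      if (diff = s.1 ∧ cost < s.2) ∨ diff < s.1 then (diff, cost) else s) s
    let s := groups.foldl (fun (s : Int × Int) item =>
      let cost := noodle + PySem.List.pyGetD item 0 0 + PySem.List.pyGetD item 1 0
      let diff := |cost - budget|
      if (diff = s.1 ∧ cost < s.2) ∨ diff < s.1 then (diff, cost) else s) s
    s) ((100000 : Int), (0 : Int))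
  s.2

-- ===== PORT B =====
-- pair_sums from Source B: head/tail recursion over the list.
def pairSumsB : List Int → List Int
  | [] => []
  | x :: xs => (xs.map (fun y => x + y)) ++ pairSumsB xs

def ramen_combo_alt (budget : Int) (ramen : List Int) (extra : List Int) : Int :=
  let addons := [0] ++ extra ++ pairSumsB extra
  let best := ramen.foldl (fun (best : Int × Int) noodle =>
    addons.foldl (fun (best : Int × Int) a =>
      let cost := noodle + a
      let cand := (|cost - budget|, cost)
      if cand.1 < best.1 ∨ (cand.1 = best.1 ∧ cand.2 < best.2) then cand else best) best)
    ((100000 : Int), (0 : Int))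
  best.2

-- ===== PRECONDITION & SPEC =====
def Spec_ramen_combo (budget : Int) (ramen : List Int) (extra : List Int) (out : Int) : Prop := out = ramen_combo_alt budget ramen extra
instance (budget : Int) (ramen : List Int) (extra : List Int) (out : Int) : Decidable (Spec_ramen_combo budget ramen extra out) := by unfold Spec_ramen_combo; infer_instance

-- ===== CLAIM (what is proved, stated in full; the proofs are below) =====
def Claim_equal_ramen_combo : Prop := ∀ (budget : Int) (ramen : List Int) (extra : List Int), Dom_ramen_combo budget ramen extra → Spec_ramen_combo budget ramen extra (ramen_combo budget ramen extra)

-- ===== LEMMAS AND PROOFS =====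

-- lexicographic running minimum on (diff, cost) pairs: both loops are folds of this function
def lmin (s p : Int × Int) : Int × Int :=
  if p.1 < s.1 ∨ (p.1 = s.1 ∧ p.2 < s.2) then p else s

def lle (a b : Int × Int) : Prop := a.1 < b.1 ∨ (a.1 = b.1 ∧ a.2 ≤ b.2)

def key (b c : Int) : Int × Int := (|c - b|, c)

theorem lmin_eq_or (s p : Int × Int) : lmin s p = s ∨ lmin s p = p := by
  unfold lmin; split_ifs <;> simp

theorem lle_lmin_left (s p : Int × Int) : lle (lmin s p) s := by
  unfold lmin lle; split_ifs with h <;> omega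

theorem lle_lmin_right (s p : Int × Int) : lle (lmin s p) p := by
  unfold lmin lle; split_ifs with h <;> omega

theorem lle_trans {a b c : Int × Int} (h1 : lle a b) (h2 : lle b c) : lle a c := by
  unfold lle at *; omega

theorem lle_antisymm {a b : Int × Int} (h1 : lle a b) (h2 : lle b a) : a = b := by
  unfold lle at *
  obtain ⟨a1, a2⟩ := a; obtain ⟨b1, b2⟩ := b
  simp only [Prod.mk.injEq]
  constructor <;> omega

theorem foldl_lmin_mem (l : List (Int × Int)) (s : Int × Int) :
    l.foldl lmin s ∈ s :: l := by
  induction l generalizing s with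
  | nil => simp [List.foldl]
  | cons a l ih =>
    simp only [List.foldl]
    rcases List.mem_cons.mp (ih (lmin s a)) with hm | hm
    · rw [hm]
      rcases lmin_eq_or s a with h2 | h2 <;> rw [h2] <;> simp
    · exact List.mem_cons_of_mem _ (List.mem_cons_of_mem _ hm)

theorem foldl_lmin_le (l : List (Int × Int)) (s : Int × Int) :
    ∀ x ∈ s :: l, lle (l.foldl lmin s) x := by
  induction l generalizing s with
  | nil =>
    intro x hx; simp only [List.foldl_nil]; simp at hx; subst hx; unfold lle; omega
  | cons a l ih =>
    intro x hx
    simp only [List.mem_cons] at hx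
    rcases hx with h | h | h
    · rw [h]; exact lle_trans (ih (lmin s a) _ (List.mem_cons_self)) (lle_lmin_left s a)
    · rw [h]; exact lle_trans (ih (lmin s a) _ (List.mem_cons_self)) (lle_lmin_right s a)
    · exact ih (lmin s a) x (List.mem_cons_of_mem _ h)

theorem foldl_lmin_congr {l l' : List (Int × Int)} (s : Int × Int)
    (h : ∀ x, x ∈ l ↔ x ∈ l') : l.foldl lmin s = l'.foldl lmin s := by
  apply lle_antisymm
  · have hm := foldl_lmin_mem l' s
    rcases List.mem_cons.mp hm with hm | hm
    · rw [hm]; exact foldl_lmin_le l s s List.mem_cons_self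
    · exact foldl_lmin_le l s _ (List.mem_cons_of_mem _ ((h _).mpr hm))
  · have hm := foldl_lmin_mem l s
    rcases List.mem_cons.mp hm with hm | hm
    · rw [hm]; exact foldl_lmin_le l' s s List.mem_cons_self
    · exact foldl_lmin_le l' s _ (List.mem_cons_of_mem _ ((h _).mp hm))

theorem foldl_foldl_lmin (K : Int → List (Int × Int)) (ramen : List Int) (s : Int × Int) :
    ramen.foldl (fun s n => (K n).foldl lmin s) s = (ramen.flatMap K).foldl lmin s := by
  induction ramen generalizing s with
  | nil => simp
  | cons n ramen ih => simp [List.foldl_append, ih]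

theorem step_eq (b : Int) (s : Int × Int) (c : Int) :
    (if (|c - b| = s.1 ∧ c < s.2) ∨ |c - b| < s.1 then (|c - b|, c) else s) = lmin s (key b c) := by
  unfold lmin key
  generalize |c - b| = d
  split_ifs with h1 h2 <;> first | rfl | omega

-- pop count on Nat, via PySem's exact bitCount
theorem pop_two_mul (k : Nat) : PySem.Int.bitCount ((2 * k : Nat) : Int) = PySem.Int.bitCount (k : Int) := by
  rcases Nat.eq_zero_or_pos k with h | h
  · subst h; simp
  · rw [PySem.Int.bitCount_natCast (m := 2 * k) (by omega)]
    simp [Nat.mul_div_cancel_left _ (by norm_num : (0:Nat) < 2), Nat.mul_mod_right]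

theorem pop_two_mul_add_one (k : Nat) :
    PySem.Int.bitCount ((2 * k + 1 : Nat) : Int) = PySem.Int.bitCount (k : Int) + 1 := by
  rw [PySem.Int.bitCount_natCast (m := 2 * k + 1) (by omega)]
  have h1 : (2 * k + 1) % 2 = 1 := by omega
  have h2 : (2 * k + 1) / 2 = k := by omega
  rw [h1, h2]; omega

-- bridge: c1go on a natural number is accumulator + popcount
theorem c1go_eq (k : Nat) (c : Int) : c1go (k : Int) c = c + (PySem.Int.bitCount (k : Int) : Int) := by
  induction k using Nat.strong_induction_on generalizing c with
  | _ k ih =>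
    rw [c1go]
    rcases Nat.eq_zero_or_pos k with h0 | h0
    · subst h0
      simp [PySem.Int.bitCount_zero]
    · rw [dif_neg (by exact_mod_cast by omega : ¬ ((k : Int) ≤ 0))]
      have hb : PySem.Int.band (k : Int) 1 = ((k % 2 : Nat) : Int) := by
        simpa [Nat.and_one_is_mod] using PySem.Int.band_natCast k 1
      have hs : (k : Int) >>> (1 : Nat) = ((k / 2 : Nat) : Int) := by
        rw [Int.shiftRight_eq_div_pow]; norm_num
      simp only [hb, hs]
      rw [ih (k / 2) (by omega)]
      rw [PySem.Int.bitCount_natCast (m := k) h0]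
      rcases Nat.mod_two_eq_zero_or_one k with h2 | h2
      · simp [h2]
      · simp [h2]
        omega

-- mask extraction function: selected elements of l for the low bits of the mask
def E : Nat → List Int → List Int
  | _, [] => []
  | 0, _ => []
  | k + 1, d :: ds => if (k + 1) % 2 = 1 then d :: E ((k + 1) / 2) ds else E ((k + 1) / 2) ds

theorem E_zero (l : List Int) : E 0 l = [] := by cases l <;> rfl

theorem E_cons (k : Nat) (d : Int) (ds : List Int) :
    E k (d :: ds) = if k % 2 = 1 then d :: E (k / 2) ds else E (k / 2) ds := by
  cases k with
  | zero => simp [E_zero, E]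
  | succ k => rfl

theorem ggLoop_eq (data : List Int) : ∀ (k : Nat) (count : Nat) (acc : List Int),
    k < 2 ^ (data.length - count) →
    ggLoop data (k : Int) (count : Int) acc = acc ++ E k (data.drop count) := by
  intro k
  induction k using Nat.strong_induction_on with
  | _ k ih =>
    intro count acc hk
    rw [ggLoop]
    rcases Nat.eq_zero_or_pos k with h0 | h0
    · subst h0
      rw [dif_pos (by exact_mod_cast le_refl (0 : Int))]
      simp [E_zero]
    · have hcount : count < data.length := by
        by_contra hc
        have hz : data.length - count = 0 := by omega
        rw [hz, pow_zero] at hk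
        omega
      rw [dif_neg (by exact_mod_cast by omega : ¬ ((k : Int) ≤ 0))]
      have hb : PySem.Int.band (k : Int) 1 = ((k % 2 : Nat) : Int) := by
        simpa [Nat.and_one_is_mod] using PySem.Int.band_natCast k 1
      have hs : (k : Int) >>> (1 : Nat) = ((k / 2 : Nat) : Int) := by
        rw [Int.shiftRight_eq_div_pow]; norm_num
      have hpow : 2 ^ (data.length - count) = 2 * 2 ^ (data.length - (count + 1)) := by
        rw [← pow_succ']
        congr 1
        omega
      have hk2 : k / 2 < 2 ^ (data.length - (count + 1)) := by omega
      have hcast : (count : Int) + 1 = ((count + 1 : Nat) : Int) := by push_cast; ring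
      simp only [hb, hs, hcast]
      rw [List.drop_eq_getElem_cons hcount, E_cons]
      have hget : PySem.List.pyGetD data (count : Int) 0 = data[count] :=
        PySem.List.pyGetD_ofNat data count 0 hcount
      rcases Nat.mod_two_eq_zero_or_one k with h2 | h2
      · simp only [h2, Nat.cast_zero]
        rw [if_neg (by norm_num), if_neg (by norm_num)]
        exact ih (k / 2) (by omega) (count + 1) acc hk2
      · simp only [h2, Nat.cast_one, hget, if_pos trivial]
        rw [ih (k / 2) (by omega) (count + 1) (acc ++ [data[count]]) hk2]
        simp

theorem mem_group_generator (data : List Int) (g : List Int) :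
    g ∈ group_generator data 2 ↔
      ∃ k : Nat, k < 2 ^ data.length ∧ PySem.Int.bitCount (k : Int) = 2 ∧ g = E k data := by
  have hcast : ((2 ^ data.length : Nat) : Int) = 2 ^ data.length := by push_cast; ring
  simp only [group_generator, selection_matrix, Int.toNat_natCast]
  rw [PySem.List.foldl_append_ite_eq_filter, PySem.List.foldl_append_singleton_eq_map]
  simp only [List.nil_append, List.mem_map, List.mem_filter, PySem.List.mem_pyRange_neg_one,
    decide_eq_true_eq]
  constructor
  · rintro ⟨m, ⟨⟨hm1, hm2⟩, hc⟩, rfl⟩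
    have hm0 : m = ((m.toNat : Nat) : Int) := by omega
    have hlt : m.toNat < 2 ^ data.length := by
      rw [← hcast] at hm2
      omega
    refine ⟨m.toNat, hlt, ?_, ?_⟩
    · rw [hm0] at hc
      unfold count_of_1 at hc
      rw [c1go_eq] at hc
      omega
    · have hb : m.toNat < 2 ^ (data.length - 0) := by simpa using hlt
      have h := ggLoop_eq data m.toNat 0 [] hb
      simp only [Nat.cast_zero, List.drop_zero, List.nil_append] at h
      rw [← h]
      conv_lhs => rw [hm0]
  · rintro ⟨k, hk, hbc, rfl⟩
    refine ⟨(k : Int), ⟨⟨by omega, ?_⟩, ?_⟩, ?_⟩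
    · rw [← hcast]
      omega
    · unfold count_of_1
      rw [c1go_eq]
      omega
    · have hb : k < 2 ^ (data.length - 0) := by simpa using hk
      simpa using ggLoop_eq data k 0 [] hb

theorem E_sublist_len (l : List Int) : ∀ k : Nat, k < 2 ^ l.length →
    List.Sublist (E k l) l ∧ (E k l).length = PySem.Int.bitCount (k : Int) := by
  induction l with
  | nil =>
    intro k hk
    simp at hk
    subst hk
    simp [E_zero, PySem.Int.bitCount_zero]
  | cons d ds ih =>
    intro k hk
    have hk2 : k / 2 < 2 ^ ds.length := by
      have : 2 ^ (d :: ds).length = 2 * 2 ^ ds.length := by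
        simp [pow_succ']
      omega
    obtain ⟨hsub, hlen⟩ := ih (k / 2) hk2
    rw [E_cons]
    rcases Nat.mod_two_eq_zero_or_one k with h2 | h2
    · have hkeq : 2 * (k / 2) = k := by omega
      have hbc : PySem.Int.bitCount (k : Int) = PySem.Int.bitCount ((k / 2 : Nat) : Int) := by
        conv_lhs => rw [← hkeq]
        exact pop_two_mul (k / 2)
      rw [if_neg (by omega)]
      exact ⟨hsub.cons d, by rw [hlen, hbc]⟩
    · have hkeq : 2 * (k / 2) + 1 = k := by omega
      have hbc : PySem.Int.bitCount (k : Int) = PySem.Int.bitCount ((k / 2 : Nat) : Int) + 1 := by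
        conv_lhs => rw [← hkeq]
        exact pop_two_mul_add_one (k / 2)
      rw [if_pos h2]
      refine ⟨List.cons_sublist_cons.mpr hsub, ?_⟩
      simp [hlen, hbc]

theorem exists_E_of_sublist {s l : List Int} (h : List.Sublist s l) :
    ∃ k : Nat, k < 2 ^ l.length ∧ PySem.Int.bitCount (k : Int) = s.length ∧ E k l = s := by
  induction h with
  | slnil =>
    exact ⟨0, by norm_num, by simp [PySem.Int.bitCount_zero], E_zero []⟩
  | @cons s ds d h ih =>
    obtain ⟨k, hk, hbc, hE⟩ := ih
    refine ⟨2 * k, ?_, ?_, ?_⟩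
    · have : 2 ^ (d :: ds).length = 2 * 2 ^ ds.length := by simp [pow_succ']
      omega
    · rw [pop_two_mul, hbc]
    · rw [E_cons]
      have : 2 * k % 2 = 0 := by omega
      rw [this]
      rw [if_neg (by norm_num)]
      have : 2 * k / 2 = k := by omega
      rw [this, hE]
  | @cons₂ s ds d h ih =>
    obtain ⟨k, hk, hbc, hE⟩ := ih
    refine ⟨2 * k + 1, ?_, ?_, ?_⟩
    · have : 2 ^ (d :: ds).length = 2 * 2 ^ ds.length := by simp [pow_succ']
      omega
    · rw [pop_two_mul_add_one, hbc]
      simp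
    · rw [E_cons]
      have h1 : (2 * k + 1) % 2 = 1 := by omega
      have h2 : (2 * k + 1) / 2 = k := by omega
      rw [h1, h2, if_pos rfl, hE]

theorem mem_pairSumsB (l : List Int) (t : Int) :
    t ∈ pairSumsB l ↔ ∃ x y : Int, List.Sublist [x, y] l ∧ t = x + y := by
  induction l with
  | nil => simp [pairSumsB]
  | cons x xs ih =>
    simp only [pairSumsB, List.mem_append, List.mem_map, ih]
    constructor
    · rintro (⟨y, hy, rfl⟩ | ⟨a, b, hab, rfl⟩)
      · exact ⟨x, y, List.cons_sublist_cons.mpr (List.singleton_sublist.mpr hy), rfl⟩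
      · exact ⟨a, b, hab.cons x, rfl⟩
    · rintro ⟨a, b, hab, rfl⟩
      rcases List.sublist_cons_iff.mp hab with h | ⟨r, hr, hrs⟩
      · exact Or.inr ⟨a, b, h, rfl⟩
      · cases hr
        exact Or.inl ⟨b, List.singleton_sublist.mp hrs, rfl⟩

theorem groups_sums_char (data : List Int) (t : Int) :
    (∃ g ∈ group_generator data 2,
        PySem.List.pyGetD g 0 0 + PySem.List.pyGetD g 1 0 = t) ↔ t ∈ pairSumsB data := by
  constructor
  · rintro ⟨g, hg, rfl⟩
    obtain ⟨k, hk, hbc, rfl⟩ := (mem_group_generator data g).mp hg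
    obtain ⟨hsub, hlen⟩ := E_sublist_len data k hk
    obtain ⟨x, y, hxy⟩ := List.length_eq_two.mp (by rw [hlen, hbc])
    rw [hxy] at hsub ⊢
    refine (mem_pairSumsB data _).mpr ⟨x, y, hsub, ?_⟩
    simp [PySem.List.pyGetD_ofNat']
  · intro ht
    obtain ⟨x, y, hsub, rfl⟩ := (mem_pairSumsB data _).mp ht
    obtain ⟨k, hk, hbc, hE⟩ := exists_E_of_sublist hsub
    refine ⟨E k data, (mem_group_generator data _).mpr ⟨k, hk, by simpa using hbc, rfl⟩, ?_⟩
    rw [hE]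
    simp [PySem.List.pyGetD_ofNat']

-- candidate key lists contributed by one noodle in A and in B
def KA (b : Int) (extra : List Int) (n : Int) : List (Int × Int) :=
  key b n :: ((extra.map fun item => key b (n + item)) ++
    ((group_generator extra 2).map fun item =>
      key b (n + PySem.List.pyGetD item 0 0 + PySem.List.pyGetD item 1 0)))

def KB (b : Int) (extra : List Int) (n : Int) : List (Int × Int) :=
  ([0] ++ extra ++ pairSumsB extra).map fun a => key b (n + a)

theorem A_norm (b : Int) (ramen extra : List Int) :
    ramen_combo b ramen extra = ((ramen.flatMap (KA b extra)).foldl lmin (100000, 0)).2 := by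
  simp only [ramen_combo]
  refine congrArg Prod.snd ?_
  rw [← foldl_foldl_lmin]
  apply PySem.List.foldl_congr_mem
  intro s n _
  simp only [step_eq]
  rw [← List.foldl_map (f := fun item => key b (n + item)) (g := lmin),
    ← List.foldl_map
      (f := fun item => key b (n + PySem.List.pyGetD item 0 0 + PySem.List.pyGetD item 1 0))
      (g := lmin)]
  simp only [KA, List.foldl_cons, List.foldl_append]

theorem B_norm (b : Int) (ramen extra : List Int) :
    ramen_combo_alt b ramen extra = ((ramen.flatMap (KB b extra)).foldl lmin (100000, 0)).2 := by
  simp only [ramen_combo_alt]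
  refine congrArg Prod.snd ?_
  rw [← foldl_foldl_lmin]
  apply PySem.List.foldl_congr_mem
  intro s n _
  simp only [KB, List.foldl_map]
  simp only [lmin, key]

theorem K_mem (b : Int) (extra : List Int) (n : Int) (x : Int × Int) :
    x ∈ KA b extra n ↔ x ∈ KB b extra n := by
  simp only [KA, KB, List.mem_cons, List.mem_append, List.mem_map]
  constructor
  · rintro (rfl | ⟨i, hi, rfl⟩ | ⟨g, hg, rfl⟩)
    · exact ⟨0, Or.inl (Or.inl (Or.inl rfl)), by simp⟩
    · exact ⟨i, Or.inl (Or.inr hi), rfl⟩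
    · have ht : PySem.List.pyGetD g 0 0 + PySem.List.pyGetD g 1 0 ∈ pairSumsB extra :=
        (groups_sums_char extra _).mp ⟨g, hg, rfl⟩
      exact ⟨_, Or.inr ht, by rw [add_assoc]⟩
  · rintro ⟨a, h, rfl⟩
    rcases h with ((rfl | h0) | ha) | ha
    · exact Or.inl (by simp)
    · simp at h0
    · exact Or.inr (Or.inl ⟨a, ha, rfl⟩)
    · obtain ⟨g, hg, hsum⟩ := (groups_sums_char extra a).mpr ha
      refine Or.inr (Or.inr ⟨g, hg, ?_⟩)
      rw [← hsum, ← add_assoc]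

-- ===== VERDICT (by name: the statement is the Claim_ definition above) =====
theorem ramen_combo_spec : Claim_equal_ramen_combo := by
  intro b ramen extra _
  unfold Spec_ramen_combo
  rw [A_norm, B_norm]
  refine congrArg Prod.snd ?_
  apply foldl_lmin_congr
  intro x
  simp only [List.mem_flatMap]
  constructor
  · rintro ⟨n, hn, hx⟩
    exact ⟨n, hn, (K_mem b extra n x).mp hx⟩
  · rintro ⟨n, hn, hx⟩
    exact ⟨n, hn, (K_mem b extra n x).mpr hx⟩
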